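-- pv_equiv track=rewrite | github.com/BasilKarol/basic-CS-algorithms-in-python | lista_2/heap_sort_3.py | BUILD_HEAP3_PLUS
-- ===== SOURCE A (Python) =====
-- def v_sum( *vectors ):
--     dim = len( vectors[0] )
--     return ( sum(vector[i] for vector in vectors) for i in range(dim))
--
-- def HEAPIFY3_PLUS(A, i, i_stop):
--     przyp=0
--     por=0
--
--     left_i = i*3 + 1
--     middle_i = i*3 + 2
--     right_i = i*3 + 3
--     Largest = i
--
--     if left_i < len(A[:i_stop]):
--         if A[:i_stop][Largest] < A[:i_stop][left_i]:
--             Largest = left_i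
--
--     if middle_i < len(A[:i_stop]):
--         if A[:i_stop][Largest] < A[:i_stop][middle_i]:
--             Largest = middle_i
--
--     if right_i < len(A[:i_stop]):
--         if A[:i_stop][Largest] < A[:i_stop][right_i]:
--             Largest = right_i
--     por += 3
--
--     if i != Largest:
--         A[i], A[Largest] = A[Largest], A[i]
--         przyp += 3
--         przyp, por = v_sum(
--             HEAPIFY3_PLUS(A, Largest, i_stop),
--             (przyp, por)
--             )
--     return przyp, por
--
-- def BUILD_HEAP3_PLUS(A):
--     przyp = 0
--     por = 0
--     for i in reversed(range(len(A) // 3)):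
--         przyp, por = v_sum(
--             HEAPIFY3_PLUS(A, i, len(A)),
--             (przyp, por)
--             )
--     return przyp, por
-- ===== SOURCE B (Python) =====
-- def BUILD_HEAP3_PLUS(A):
--     # Iterative sift-down replacing the recursive HEAPIFY3_PLUS/v_sum tuple folding;
--     # mutates A in place exactly like the original.
--     przyp = 0
--     por = 0
--     n = len(A)
--     for i in reversed(range(n // 3)):
--         j = i
--         while True:
--             l = 3 * j + 1
--             m = 3 * j + 2
--             r = 3 * j + 3
--             largest = j
--             if l < n and A[largest] < A[l]:
--                 largest = l
--             if m < n and A[largest] < A[m]: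
--                 largest = m
--             if r < n and A[largest] < A[r]:
--                 largest = r
--             por += 3
--             if j != largest:
--                 A[j], A[largest] = A[largest], A[j]
--                 przyp += 3
--                 j = largest
--             else:
--                 break
--     return przyp, por
-- ===== Notes on version B (the rewrite author's own statement) =====
-- stated objective: faster
-- what changed: Replaces the recursive HEAPIFY3_PLUS that re-slices A[:i_stop] (an O(n) copy) at every comparison and folds counter tuples through a generator-based v_sum with a plain iterative sift-down that indexes A directly and accumulates the two counters as ints.
import Mathlib
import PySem

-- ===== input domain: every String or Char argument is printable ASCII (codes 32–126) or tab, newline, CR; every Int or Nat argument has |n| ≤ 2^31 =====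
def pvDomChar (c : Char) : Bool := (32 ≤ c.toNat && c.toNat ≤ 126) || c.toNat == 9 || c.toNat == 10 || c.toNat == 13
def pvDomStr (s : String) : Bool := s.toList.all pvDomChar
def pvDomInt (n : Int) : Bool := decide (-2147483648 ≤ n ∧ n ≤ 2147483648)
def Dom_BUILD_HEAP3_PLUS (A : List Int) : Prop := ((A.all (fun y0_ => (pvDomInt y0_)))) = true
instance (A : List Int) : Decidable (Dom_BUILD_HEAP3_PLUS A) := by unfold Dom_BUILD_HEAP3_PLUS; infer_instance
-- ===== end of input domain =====

-- B replaces the recursive, slice-copying HEAPIFY3_PLUS + generator v_sum counter folding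
-- with an iterative in-place sift-down accumulating the counters directly (objective: simpler).
-- Both Pythons mutate A in place identically; the equivalence proved is about the returned
-- (przyp, por) counters, rendered as a two-element list.


-- ===== PORT A =====
-- HEAPIFY3_PLUS: the recursion is made total with a fuel counter (Python's call depth is
-- bounded by i_stop; BUILD_HEAP3_PLUS passes fuel = len(A), never exhausted).
-- A[:i_stop][k] is ported as (A.take i_stop).getD k 0: every read is guarded, so on the
-- calls BUILD_HEAP3_PLUS makes the index is in range (exact there; Python never raises).
-- Returns the mutated list together with (przyp, por).
def pvHeapifyA (fuel : Nat) (A : List Int) (i i_stop : Nat) : List Int × Int × Int :=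
  match fuel with
  | 0 => (A, 0, 0)
  | fuel + 1 =>
    let s := A.take i_stop
    let left_i := i * 3 + 1
    let middle_i := i * 3 + 2
    let right_i := i * 3 + 3
    let L1 := if left_i < s.length then
                (if s.getD i 0 < s.getD left_i 0 then left_i else i) else i
    let L2 := if middle_i < s.length then
                (if s.getD L1 0 < s.getD middle_i 0 then middle_i else L1) else L1
    let Largest := if right_i < s.length then
                (if s.getD L2 0 < s.getD right_i 0 then right_i else L2) else L2
    let por : Int := 3
    if i ≠ Largest then
      let ai := A.getD i 0
      let aL := A.getD Largest 0
      let A' := (A.set i aL).set Largest ai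
      let r := pvHeapifyA fuel A' Largest i_stop
      (r.1, r.2.1 + 3, r.2.2 + por)          -- przyp, por = v_sum(HEAPIFY3_PLUS(...), (przyp, por))
    else (A, 0, por)

def BUILD_HEAP3_PLUS (A : List Int) : List Int :=
  let r := (List.range (A.length / 3)).reverse.foldl
    (fun (st : List Int × Int × Int) i =>
      let h := pvHeapifyA st.1.length st.1 i st.1.length
      (h.1, h.2.1 + st.2.1, h.2.2 + st.2.2))
    (A, 0, 0)
  [r.2.1, r.2.2]

-- ===== PORT B =====
-- the while-True sift-down loop of Source B, made total with fuel (= n, never exhausted);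
-- state (list, przyp, por) threaded through the loop.
def pvSiftB (fuel : Nat) (A : List Int) (j n : Nat) (przyp por : Int) :
    List Int × Int × Int :=
  match fuel with
  | 0 => (A, przyp, por)
  | fuel + 1 =>
    let l := j * 3 + 1
    let m := j * 3 + 2
    let r := j * 3 + 3
    let g1 := if l < n ∧ A.getD j 0 < A.getD l 0 then l else j
    let g2 := if m < n ∧ A.getD g1 0 < A.getD m 0 then m else g1
    let largest := if r < n ∧ A.getD g2 0 < A.getD r 0 then r else g2
    if j ≠ largest then
      let aj := A.getD j 0
      let ag := A.getD largest 0
      pvSiftB fuel ((A.set j ag).set largest aj) largest n (przyp + 3) (por + 3)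
    else (A, przyp, por + 3)

def BUILD_HEAP3_PLUS_alt (A : List Int) : List Int :=
  let n := A.length
  let r := (List.range (n / 3)).reverse.foldl
    (fun (st : List Int × Int × Int) i => pvSiftB n st.1 i n st.2.1 st.2.2)
    (A, 0, 0)
  [r.2.1, r.2.2]

-- ===== PRECONDITION & SPEC =====
def Spec_BUILD_HEAP3_PLUS (A : List Int) (out : List Int) : Prop := out = BUILD_HEAP3_PLUS_alt A
instance (A : List Int) (out : List Int) : Decidable (Spec_BUILD_HEAP3_PLUS A out) := by unfold Spec_BUILD_HEAP3_PLUS; infer_instance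

-- ===== CLAIM (what is proved, stated in full; the proofs are below) =====
def Claim_equal_BUILD_HEAP3_PLUS : Prop := ∀ (A : List Int), Dom_BUILD_HEAP3_PLUS A → Spec_BUILD_HEAP3_PLUS A (BUILD_HEAP3_PLUS A)

-- ===== LEMMAS AND PROOFS =====

theorem pvIfAnd {P Q : Prop} [Decidable P] [Decidable Q] (x y : Nat) :
    (if P ∧ Q then x else y) = (if P then (if Q then x else y) else y) := by
  by_cases hP : P <;> by_cases hQ : Q <;> simp [hP, hQ]

theorem pvHeapifyA_length (fuel : Nat) (A : List Int) (i i_stop : Nat) :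
    (pvHeapifyA fuel A i i_stop).1.length = A.length := by
  induction fuel generalizing A i with
  | zero => rfl
  | succ fuel ih =>
    simp only [pvHeapifyA]
    split_ifs <;> simp [ih]

-- with n = A.length the two sift-downs take identical steps; B threads the
-- accumulators that A adds after the recursion returns.
theorem pvSift_eq_pvHeapify (n : Nat) (fuel : Nat) (A : List Int) (i : Nat) (p c : Int)
    (hn : A.length = n) :
    pvSiftB fuel A i n p c =
      ((pvHeapifyA fuel A i n).1,
       p + (pvHeapifyA fuel A i n).2.1,
       c + (pvHeapifyA fuel A i n).2.2) := by
  induction fuel generalizing A i p c with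
  | zero => simp [pvSiftB, pvHeapifyA]
  | succ fuel ih =>
    have ht : A.take n = A := by rw [← hn]; exact List.take_length
    simp only [pvSiftB, pvHeapifyA, ht, hn, pvIfAnd]
    split_ifs <;>
      first
        | (rw [ih _ _ _ _ (by simp [hn])]
           simp only [Prod.mk.injEq]
           exact ⟨by trivial, by ring, by ring⟩)
        | simp

-- ===== VERDICT (by name: the statement is the Claim_ definition above) =====
theorem BUILD_HEAP3_PLUS_spec : Claim_equal_BUILD_HEAP3_PLUS := by
  intro A _
  unfold Spec_BUILD_HEAP3_PLUS BUILD_HEAP3_PLUS BUILD_HEAP3_PLUS_alt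
  simp only []
  suffices h : ∀ (l : List Nat) (st : List Int × Int × Int), st.1.length = A.length →
      l.foldl (fun (st : List Int × Int × Int) i =>
          let h := pvHeapifyA st.1.length st.1 i st.1.length
          (h.1, h.2.1 + st.2.1, h.2.2 + st.2.2)) st =
      l.foldl (fun (st : List Int × Int × Int) i =>
          pvSiftB A.length st.1 i A.length st.2.1 st.2.2) st by
    rw [h _ (A, 0, 0) rfl]
  intro l
  induction l with
  | nil => intro st _; rfl
  | cons x xs ih =>
    intro st hst
    simp only [List.foldl_cons]
    rw [hst, pvSift_eq_pvHeapify A.length A.length st.1 x st.2.1 st.2.2 hst]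
    have hlen : (pvHeapifyA A.length st.1 x A.length).1.length = A.length := by
      rw [pvHeapifyA_length, hst]
    have hcomm : ((pvHeapifyA A.length st.1 x A.length).1,
        (pvHeapifyA A.length st.1 x A.length).2.1 + st.2.1,
        (pvHeapifyA A.length st.1 x A.length).2.2 + st.2.2) =
        ((pvHeapifyA A.length st.1 x A.length).1,
        st.2.1 + (pvHeapifyA A.length st.1 x A.length).2.1,
        st.2.2 + (pvHeapifyA A.length st.1 x A.length).2.2) := by
      simp only [Prod.mk.injEq]; exact ⟨by trivial, by ring, by ring⟩
    rw [hcomm]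
    exact ih _ (by simpa using hlen)
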